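-- pv_equiv track=rewrite | github.com/BMcGinn-Dev/FetchTakeHomeAssignment | SiteReliability.py | log_results
-- ===== SOURCE A (Python) =====
-- def log_results(health_checks):
--     fetch_domain, fetch_count, fetch_ups = "fetch.com", 0, 0
--     rewards_domain, rewards_count, rewards_ups = "www.fetchrewards.com", 0, 0
--
--     for check in health_checks:
--         url = check[0]
--         up_down = check[1]
--
--         if fetch_domain in url:
--             fetch_count += 1
--             if up_down == "UP":
--                 fetch_ups += 1
--         elif rewards_domain in url:
--             rewards_count += 1
--             if up_down == "UP":
--                 rewards_ups += 1
--
--     rotations = [fetch_count, fetch_ups, rewards_count, rewards_ups]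
--
--     return rotations
-- ===== SOURCE B (Python) =====
-- def log_results(health_checks):
--     fetch = [c for c in health_checks if "fetch.com" in c[0]]
--     rewards = [c for c in health_checks
--                if "www.fetchrewards.com" in c[0] and "fetch.com" not in c[0]]
--     fetch_ups = len([c for c in fetch if c[1] == "UP"])
--     rewards_ups = len([c for c in rewards if c[1] == "UP"])
--     return [len(fetch), fetch_ups, len(rewards), rewards_ups]
-- ===== Notes on version B (the rewrite author's own statement) =====
-- stated objective: alternative
-- what changed: Replaces A's single accumulator loop over four mutable counters with a partition-then-count decomposition: per-domain sublists built by filtering (with the elif priority expressed as a negated membership), and the four results computed as lengths of filtered lists.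
import Mathlib
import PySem

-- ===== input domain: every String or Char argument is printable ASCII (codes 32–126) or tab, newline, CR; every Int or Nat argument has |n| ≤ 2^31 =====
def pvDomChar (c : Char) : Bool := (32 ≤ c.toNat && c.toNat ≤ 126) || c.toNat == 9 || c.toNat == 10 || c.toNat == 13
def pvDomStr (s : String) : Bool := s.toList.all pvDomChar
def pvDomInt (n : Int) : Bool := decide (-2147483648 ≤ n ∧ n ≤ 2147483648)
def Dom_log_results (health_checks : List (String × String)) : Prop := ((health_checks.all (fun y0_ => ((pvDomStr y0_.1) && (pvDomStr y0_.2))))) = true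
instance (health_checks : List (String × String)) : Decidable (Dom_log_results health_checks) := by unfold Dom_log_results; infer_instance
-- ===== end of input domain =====

-- B replaces A's single four-counter accumulator loop with a partition-then-count decomposition
-- (per-domain filtered sublists, counts as lengths); same O(n) cost, alternative structure.


-- ===== PORT A =====
-- A: one pass, four mutable counters, if/elif on substring tests
def log_results_loop (checks : List (String × String)) (st : Int × Int × Int × Int) : Int × Int × Int × Int :=
  match checks with
  | [] => st
  | check :: rest =>
    let url := check.1
    let up_down := check.2
    let st' :=
      if PySem.Str.isIn "fetch.com" url then
        (st.1 + 1, (if up_down == "UP" then st.2.1 + 1 else st.2.1), st.2.2.1, st.2.2.2)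
      else if PySem.Str.isIn "www.fetchrewards.com" url then
        (st.1, st.2.1, st.2.2.1 + 1, (if up_down == "UP" then st.2.2.2 + 1 else st.2.2.2))
      else st
    log_results_loop rest st'

def log_results (health_checks : List (String × String)) : List Int :=
  let st := log_results_loop health_checks (0, 0, 0, 0)
  [st.1, st.2.1, st.2.2.1, st.2.2.2]

-- ===== PORT B =====
-- B: partition into per-domain sublists, then counts are lengths of filtered lists
def log_results_alt (health_checks : List (String × String)) : List Int :=
  let fetch := health_checks.filter (fun c => PySem.Str.isIn "fetch.com" c.1)
  let rewards := health_checks.filter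
    (fun c => PySem.Str.isIn "www.fetchrewards.com" c.1 && !PySem.Str.isIn "fetch.com" c.1)
  let fetch_ups := (fetch.filter (fun c => c.2 == "UP")).length
  let rewards_ups := (rewards.filter (fun c => c.2 == "UP")).length
  [(fetch.length : Int), fetch_ups, rewards.length, rewards_ups]

-- ===== PRECONDITION & SPEC =====
def Spec_log_results (health_checks : List (String × String)) (out : List Int) : Prop := out = log_results_alt health_checks
instance (health_checks : List (String × String)) (out : List Int) : Decidable (Spec_log_results health_checks out) := by unfold Spec_log_results; infer_instance

-- ===== CLAIM (what is proved, stated in full; the proofs are below) =====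
def Claim_equal_log_results : Prop := ∀ (health_checks : List (String × String)), Dom_log_results health_checks → Spec_log_results health_checks (log_results health_checks)

-- ===== LEMMAS AND PROOFS =====

-- ===== VERDICT (by name: the statement is the Claim_ definition above) =====
theorem log_results_loop_eq (checks : List (String × String)) (a b c d : Int) :
    log_results_loop checks (a, b, c, d) =
      (a + (checks.filter (fun x => PySem.Str.isIn "fetch.com" x.1)).length,
       b + ((checks.filter (fun x => PySem.Str.isIn "fetch.com" x.1)).filter
              (fun x => x.2 == "UP")).length,
       c + (checks.filter (fun x =>
              PySem.Str.isIn "www.fetchrewards.com" x.1 && !PySem.Str.isIn "fetch.com" x.1)).length,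
       d + ((checks.filter (fun x =>
              PySem.Str.isIn "www.fetchrewards.com" x.1 && !PySem.Str.isIn "fetch.com" x.1)).filter
              (fun x => x.2 == "UP")).length) := by
  induction checks generalizing a b c d with
  | nil => simp [log_results_loop]
  | cons hd tl ih =>
    simp only [log_results_loop]
    cases h1 : PySem.Str.isIn "fetch.com" hd.1 with
    | true =>
      cases h2 : hd.2 == "UP" <;>
        simp only [h1, h2, List.filter_cons, Bool.not_true, Bool.and_false,
          Bool.false_eq_true, ite_false, ite_true, ih, List.length_cons,
          Prod.mk.injEq, Nat.cast_add, Nat.cast_one, and_true, true_and] <;> omega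
    | false =>
      cases h2 : PySem.Str.isIn "www.fetchrewards.com" hd.1 with
      | true =>
        cases h3 : hd.2 == "UP" <;>
          simp only [h1, h2, h3, List.filter_cons, Bool.not_false, Bool.and_true,
            Bool.false_eq_true, ite_false, ite_true, ih, List.length_cons,
            Prod.mk.injEq, Nat.cast_add, Nat.cast_one, and_true, true_and] <;> omega
      | false =>
        simp only [h1, h2, List.filter_cons, Bool.false_and, Bool.false_eq_true, ite_false, ih]

theorem log_results_spec : Claim_equal_log_results := by
  intro hc _
  unfold Spec_log_results log_results log_results_alt
  rw [log_results_loop_eq]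
  simp
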